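-- pv_equiv track=rewrite | github.com/AlexanderSibirko/PythonGBStudy | Task12.py | dict_by_rule
-- ===== SOURCE A (Python) =====
-- def dict_by_rule(N):
--     d_result = {}
--     for i in range(0,N):
--         if i == 0 :
--             d_result[i] = 1
--         else:
--             d_result[i] = d_result[i-1]*3 + 1
--     return d_result
-- ===== SOURCE B (Python) =====
-- def dict_by_rule(N):
--     return {i: (3 ** (i + 1) - 1) // 2 for i in range(N)}
-- ===== Notes on version B (the rewrite author's own statement) =====
-- stated objective: simpler
-- what changed: Replaces the accumulator recurrence (each value is triple the previous plus one, with a special case at the first index) by a one-line dict comprehension computing each value independently from the closed form of that geometric recurrence via integer power and floor division.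
import Mathlib
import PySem

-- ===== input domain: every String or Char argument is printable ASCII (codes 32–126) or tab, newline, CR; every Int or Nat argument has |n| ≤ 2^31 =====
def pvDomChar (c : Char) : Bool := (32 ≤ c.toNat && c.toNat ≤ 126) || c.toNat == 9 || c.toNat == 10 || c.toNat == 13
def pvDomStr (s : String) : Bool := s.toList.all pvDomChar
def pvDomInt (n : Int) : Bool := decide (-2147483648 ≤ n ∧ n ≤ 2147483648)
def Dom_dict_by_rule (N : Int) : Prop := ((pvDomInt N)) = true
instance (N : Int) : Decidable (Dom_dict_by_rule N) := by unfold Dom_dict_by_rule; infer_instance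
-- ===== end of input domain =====

-- B replaces A's accumulator recurrence d[i]=d[i-1]*3+1 by a dict comprehension using
-- the closed form (3**(i+1)-1)//2; same cost, simpler.


-- ===== PORT A =====
-- Loop body of A's dict-building loop (d[i] = 1 if i == 0 else d[i-1]*3 + 1).
-- d_result[i-1] in A always succeeds (i-1 was inserted in the previous iteration),
-- so Dict.getD with default 0 is exact here.
def dictByRuleStep (d : PySem.Dict Int Int) (i : Int) : PySem.Dict Int Int :=
  if i == 0 then d.insert i 1 else d.insert i (d.getD (i - 1) 0 * 3 + 1)

def dict_by_rule (N : Int) : List (Int × Int) :=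
  ((PySem.List.pyRange 0 N 1).foldl dictByRuleStep PySem.Dict.empty).items

-- ===== PORT B =====
def dict_by_rule_alt (N : Int) : List (Int × Int) :=
  (PySem.List.pyRange 0 N 1).map (fun i => (i, PySem.Int.floordiv (3 ^ (i + 1).toNat - 1) 2))

-- ===== PRECONDITION & SPEC =====
def Spec_dict_by_rule (N : Int) (out : List (Int × Int)) : Prop := out = dict_by_rule_alt N
instance (N : Int) (out : List (Int × Int)) : Decidable (Spec_dict_by_rule N out) := by unfold Spec_dict_by_rule; infer_instance

-- ===== CLAIM (what is proved, stated in full; the proofs are below) =====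
def Claim_equal_dict_by_rule : Prop := ∀ (N : Int), Dom_dict_by_rule N → Spec_dict_by_rule N (dict_by_rule N)

-- ===== LEMMAS AND PROOFS =====

lemma dictByRule_closed_step (i : Int) (h : 1 ≤ i) :
    PySem.Int.floordiv (3 ^ (i - 1 + 1).toNat - 1) 2 * 3 + 1
      = PySem.Int.floordiv (3 ^ (i + 1).toNat - 1) 2 := by
  have hm : (i - 1 + 1).toNat = i.toNat := by omega
  have hm2 : (i + 1).toNat = i.toNat + 1 := by omega
  rw [hm, hm2]
  have hodd : Odd ((3 : Int) ^ i.toNat) := Odd.pow (by decide)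
  obtain ⟨k, hk⟩ := hodd
  have hsucc : (3 : Int) ^ (i.toNat + 1) = 3 * 3 ^ i.toNat := by ring
  rw [PySem.Int.floordiv_eq_ediv_of_pos (by norm_num),
      PySem.Int.floordiv_eq_ediv_of_pos (by norm_num), hsucc, hk]
  omega

lemma dictByRule_fold_items (n : Nat) :
    ((PySem.List.pyRange 0 (n : Int) 1).foldl dictByRuleStep PySem.Dict.empty).items
      = (PySem.List.pyRange 0 (n : Int) 1).map
          (fun i => (i, PySem.Int.floordiv (3 ^ (i + 1).toNat - 1) 2)) := by
  induction n with
  | zero => decide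
  | succ n ih =>
    have hcast : ((n + 1 : Nat) : Int) = (n : Int) + 1 := by push_cast; ring
    rw [hcast, PySem.List.pyRange_one_succ_right (by positivity),
        List.foldl_append, List.map_append]
    set d := (PySem.List.pyRange 0 (n : Int) 1).foldl dictByRuleStep PySem.Dict.empty with hd
    have hkeys : d.keys = PySem.List.pyRange 0 (n : Int) 1 := by
      show d.items.map (·.1) = _
      rw [ih, List.map_map]
      exact List.map_id _
    have hnodup : d.keys.Nodup := by rw [hkeys]; exact PySem.List.nodup_pyRange_one 0 _
    have hnc : d.contains (n : Int) = false := by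
      rw [PySem.Dict.contains_eq_decide_mem_keys, hkeys]
      simp [PySem.List.mem_pyRange_one]
    simp only [List.foldl_cons, List.foldl_nil, List.map_cons, List.map_nil]
    rcases Nat.eq_zero_or_pos n with h0 | hpos
    · subst h0
      simp only [Nat.cast_zero] at hd ⊢
      simp only [hd]
      decide
    · have hn0 : ((n : Int) == 0) = false := by
        simp; omega
      have hmem : ((n : Int) - 1,
          PySem.Int.floordiv (3 ^ ((n : Int) - 1 + 1).toNat - 1) 2) ∈ d.items := by
        rw [ih]
        exact List.mem_map.2 ⟨(n : Int) - 1,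
          (PySem.List.mem_pyRange_one).2 ⟨by omega, by omega⟩, rfl⟩
      have hget : d.getD ((n : Int) - 1) 0
          = PySem.Int.floordiv (3 ^ ((n : Int) - 1 + 1).toNat - 1) 2 :=
        PySem.Dict.getD_of_mem_items d hmem hnodup 0
      rw [show dictByRuleStep d (n : Int)
            = d.insert (n : Int) (d.getD ((n : Int) - 1) 0 * 3 + 1) by
          simp [dictByRuleStep, hn0],
        PySem.Dict.items_insert_of_not_contains d _ hnc, ih, hget,
        dictByRule_closed_step (n : Int) (by omega)]

-- ===== VERDICT (by name: the statement is the Claim_ definition above) =====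
theorem dict_by_rule_spec : Claim_equal_dict_by_rule := by
  intro N _
  unfold Spec_dict_by_rule dict_by_rule dict_by_rule_alt
  by_cases h : N ≤ 0
  · rw [PySem.List.pyRange_one_eq_nil h]; rfl
  · have hN : N = (N.toNat : Int) := by omega
    rw [hN]; exact dictByRule_fold_items N.toNat
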